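-- pv_equiv track=rewrite | github.com/DucHai972/Q_Benchmark | generate_stackoverflow_answer_lookup.py | decode_mcq_answer
-- ===== SOURCE A (Python) =====
-- def decode_mcq_answer(feature, coded_answer, questions_schema):
--     """Decode MCQ answer from coded value to human-readable text."""
--     if feature not in questions_schema:
--         return str(coded_answer)
--
--     question_text = questions_schema[feature]
--
--     if '[MCQ:' not in question_text:
--         return str(coded_answer)
--
--     # Extract MCQ options
--     mcq_part = question_text.split('[MCQ:')[1].split(']')[0]
--     options = {}
--
--     # Parse options like "A. Option1 B. Option2"
--     parts = mcq_part.strip().split()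
--     current_key = None
--     current_value = []
--
--     for part in parts:
--         if len(part) == 2 and part[1] == '.':
--             if current_key:
--                 options[current_key] = ' '.join(current_value)
--             current_key = part[0]
--             current_value = []
--         else:
--             current_value.append(part)
--
--     if current_key:
--         options[current_key] = ' '.join(current_value)
--
--     return options.get(str(coded_answer), str(coded_answer))
-- ===== SOURCE B (Python) =====
-- def decode_mcq_answer(feature, coded_answer, questions_schema):
--     """Decode MCQ answer: chunk the token stream at key tokens instead of
--     carrying current_key/current_value accumulator state."""
--     if feature not in questions_schema:
--         return str(coded_answer)
--     question_text = questions_schema[feature]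
--     if '[MCQ:' not in question_text:
--         return str(coded_answer)
--     tokens = question_text.split('[MCQ:')[1].split(']')[0].strip().split()
--     pairs = []
--     i, n = 0, len(tokens)
--     while i < n:
--         t = tokens[i]
--         i += 1
--         if len(t) == 2 and t[1] == '.':
--             j = i
--             while j < n and not (len(tokens[j]) == 2 and tokens[j][1] == '.'):
--                 j += 1
--             pairs.append((t[0], ' '.join(tokens[i:j])))
--             i = j
--     options = dict(pairs)
--     return options.get(str(coded_answer), str(coded_answer))
-- ===== Notes on version B (the rewrite author's own statement) =====
-- stated objective: alternative
-- what changed: The stateful accumulation loop (current_key/current_value carried across iterations, insert deferred to the next key or loop end) is replaced by stateless chunking: scan to each key token, take the span of value tokens up to the next key, emit (key, joined span) pairs, and build the dict from the pair list at the end.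
import Mathlib
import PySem

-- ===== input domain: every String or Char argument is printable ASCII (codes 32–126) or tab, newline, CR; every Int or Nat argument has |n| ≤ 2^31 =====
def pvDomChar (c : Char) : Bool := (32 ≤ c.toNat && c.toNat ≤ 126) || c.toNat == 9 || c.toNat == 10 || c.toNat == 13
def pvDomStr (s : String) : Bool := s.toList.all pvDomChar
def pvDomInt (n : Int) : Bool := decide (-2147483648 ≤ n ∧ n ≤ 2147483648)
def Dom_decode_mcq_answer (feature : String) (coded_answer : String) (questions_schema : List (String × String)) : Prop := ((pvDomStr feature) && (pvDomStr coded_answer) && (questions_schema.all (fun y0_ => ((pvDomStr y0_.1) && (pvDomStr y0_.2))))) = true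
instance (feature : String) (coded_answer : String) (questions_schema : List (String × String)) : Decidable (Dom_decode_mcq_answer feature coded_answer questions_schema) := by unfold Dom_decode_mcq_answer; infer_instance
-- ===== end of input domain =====

-- B rewrites A's stateful token-accumulation loop as stateless span-chunking at key tokens; objective: alternative decomposition (same cost).

-- ===== PORT A =====
-- "len(part) == 2 and part[1] == '.'" — the key-token test, shared text of both Pythons
def pvIsKey (t : String) : Bool :=
  PySem.Str.len t == 2 && (PySem.Str.pyGet? t 1 == some '.')

-- "question_text.split('[MCQ:')[1].split(']')[0]" — the [1] is guarded by "'[MCQ:' in question_text", so the getD defaults are never used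
def pvMcqPart (question_text : String) : String :=
  (PySem.List.pyGet? ((PySem.Str.split? ((PySem.List.pyGet? ((PySem.Str.split? question_text "[MCQ:").getD []) 1).getD "") "]").getD []) 0).getD ""

-- the body of A's for-loop: state = (options, current_key, current_value)
def pvStepA (st : PySem.Dict String String × Option String × List String) (part : String) :
    PySem.Dict String String × Option String × List String :=
  if pvIsKey part then
    (match st.2.1 with
      | some k => st.1.insert k (PySem.Str.join " " st.2.2)
      | none => st.1,
     some (String.ofList [(PySem.Str.pyGet? part 0).getD ' ']), [])
  else (st.1, st.2.1, st.2.2 ++ [part])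

-- the trailing "if current_key: options[current_key] = ..."
def pvFinishA (st : PySem.Dict String String × Option String × List String) : PySem.Dict String String :=
  match st.2.1 with
  | some k => st.1.insert k (PySem.Str.join " " st.2.2)
  | none => st.1

def decode_mcq_answer (feature : String) (coded_answer : String) (questions_schema : List (String × String)) : String :=
  let schema := PySem.Dict.ofList questions_schema
  if !schema.contains feature then coded_answer
  else
    let question_text := (schema.get? feature).getD ""   -- guarded by contains: the default is never used
    if !PySem.Str.isIn "[MCQ:" question_text then coded_answer
    else
      let parts := PySem.Str.split₀ (PySem.Str.strip (pvMcqPart question_text))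
      let options := pvFinishA (parts.foldl pvStepA (PySem.Dict.empty, none, []))
      options.getD coded_answer coded_answer

-- ===== PORT B =====
-- the outer while-loop of Source B: at each key token take the span of value tokens up to the next key (the inner j-scan), emit the pair, continue after the span
def pvChunks : List String → List (String × String)
  | [] => []
  | t :: ts =>
    if pvIsKey t then
      (String.ofList [(PySem.Str.pyGet? t 0).getD ' '],
       PySem.Str.join " " (ts.takeWhile (fun u => !pvIsKey u)))
        :: pvChunks (ts.dropWhile (fun u => !pvIsKey u))
    else pvChunks ts
termination_by l => l.length
decreasing_by
  · exact Nat.lt_succ_of_le (List.length_dropWhile_le _ _)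
  · simp

def decode_mcq_answer_alt (feature : String) (coded_answer : String) (questions_schema : List (String × String)) : String :=
  let schema := PySem.Dict.ofList questions_schema
  if !schema.contains feature then coded_answer
  else
    let question_text := (schema.get? feature).getD ""   -- guarded by contains: the default is never used
    let tokens := PySem.Str.split₀ (PySem.Str.strip (pvMcqPart question_text))
    if !PySem.Str.isIn "[MCQ:" question_text then coded_answer
    else
      let options := PySem.Dict.ofList (pvChunks tokens)
      options.getD coded_answer coded_answer

-- ===== PRECONDITION & SPEC =====
def Spec_decode_mcq_answer (feature : String) (coded_answer : String) (questions_schema : List (String × String)) (out : String) : Prop := out = decode_mcq_answer_alt feature coded_answer questions_schema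
instance (feature : String) (coded_answer : String) (questions_schema : List (String × String)) (out : String) : Decidable (Spec_decode_mcq_answer feature coded_answer questions_schema out) := by unfold Spec_decode_mcq_answer; infer_instance

-- ===== CLAIM (what is proved, stated in full; the proofs are below) =====
def Claim_equal_decode_mcq_answer : Prop := ∀ (feature : String) (coded_answer : String) (questions_schema : List (String × String)), Dom_decode_mcq_answer feature coded_answer questions_schema → Spec_decode_mcq_answer feature coded_answer questions_schema (decode_mcq_answer feature coded_answer questions_schema)

-- ===== LEMMAS AND PROOFS =====

-- A's loop, resumed in the "current_key = some k" state, equals inserting the pending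
-- option (extended by the next value span) and then folding B's chunks of the rest.
theorem pvLoopA_some (ts : List String) (d : PySem.Dict String String) (k : String) (acc : List String) :
    pvFinishA (ts.foldl pvStepA (d, some k, acc)) =
      (pvChunks (ts.dropWhile (fun u => !pvIsKey u))).foldl (fun d p => d.insert p.1 p.2)
        (d.insert k (PySem.Str.join " " (acc ++ ts.takeWhile (fun u => !pvIsKey u)))) := by
  induction ts generalizing d k acc with
  | nil => simp [pvFinishA, pvChunks]
  | cons u us ih =>
    by_cases h : pvIsKey u
    · simp only [List.foldl_cons, pvStepA, h, if_true, List.takeWhile_cons, List.dropWhile_cons,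
        Bool.not_true, Bool.false_eq_true, if_false, List.append_nil]
      rw [ih]
      simp [pvChunks, h]
    · rw [Bool.not_eq_true] at h
      simp only [List.foldl_cons, pvStepA, h, Bool.false_eq_true, if_false, List.takeWhile_cons,
        List.dropWhile_cons, Bool.not_false, if_true]
      rw [ih]
      simp [List.append_assoc]

-- A's loop from the initial "no current key" state equals folding B's chunk list.
theorem pvLoopA_none (toks : List String) (d : PySem.Dict String String) (cv : List String) :
    pvFinishA (toks.foldl pvStepA (d, none, cv)) =
      (pvChunks toks).foldl (fun d p => d.insert p.1 p.2) d := by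
  induction toks generalizing cv with
  | nil => simp [pvFinishA, pvChunks]
  | cons t ts ih =>
    by_cases h : pvIsKey t
    · simp only [List.foldl_cons, pvStepA, h, if_true]
      rw [pvLoopA_some]
      simp [pvChunks, h]
    · rw [Bool.not_eq_true] at h
      simp only [List.foldl_cons, pvStepA, h, Bool.false_eq_true, if_false]
      rw [ih]
      simp [pvChunks, h]

-- ===== VERDICT (by name: the statement is the Claim_ definition above) =====
theorem decode_mcq_answer_spec : Claim_equal_decode_mcq_answer := by
  intro feature coded_answer questions_schema _
  unfold Spec_decode_mcq_answer decode_mcq_answer decode_mcq_answer_alt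
  by_cases h1 : (PySem.Dict.ofList questions_schema).contains feature
  · by_cases h2 : PySem.Str.isIn "[MCQ:" (((PySem.Dict.ofList questions_schema).get? feature).getD "")
    · simp only [h1, h2, Bool.not_true, Bool.false_eq_true, if_false]
      rw [pvLoopA_none]
      rfl
    · rw [Bool.not_eq_true] at h2
      simp only [h1, h2, Bool.not_true, Bool.not_false, Bool.false_eq_true, if_false, if_true]
  · rw [Bool.not_eq_true] at h1
    simp only [h1, Bool.not_false, if_true]
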